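-- pv_equiv track=rewrite | github.com/needitem/autostock | src/core/news.py | _merge_news
-- ===== SOURCE A (Python) =====
-- def _merge_news(news_lists: list[list[dict]], limit: int) -> list[dict]:
--     """Merge feeds by newest timestamp after removing duplicates."""
--     by_key: dict[str, dict] = {}
--     for items in news_lists:
--         for item in items:
--             key = item.get("url") or item.get("headline")
--             if not key:
--                 continue
--             prev = by_key.get(key)
--             prev_ts = int((prev or {}).get("published_ts", 0) or 0)
--             curr_ts = int(item.get("published_ts", 0) or 0)
--             if prev is None or curr_ts > prev_ts:
--                 by_key[key] = item
--
--     merged = sorted(by_key.values(), key=lambda x: int(x.get("published_ts", 0) or 0), reverse=True)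
--     return merged[: max(0, limit)]
-- ===== SOURCE B (Python) =====
-- def _merge_news(news_lists: list[list[dict]], limit: int) -> list[dict]:
--     """Merge feeds: group items by key, take each group's newest (first-max) item,
--     then sort representatives by (-timestamp, first-appearance rank)."""
--     order = []            # distinct keys, first-appearance order
--     groups = {}           # key -> list of (ts, item)
--     for items in news_lists:
--         for item in items:
--             key = item.get("url") or item.get("headline")
--             if not key:
--                 continue
--             if key not in groups:
--                 groups[key] = []
--                 order.append(key)
--             groups[key].append((int(item.get("published_ts", 0) or 0), item))
--     reps = []
--     for i, key in enumerate(order):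
--         ts, item = max(groups[key], key=lambda p: p[0])
--         reps.append((-ts, i, item))
--     reps.sort(key=lambda t: (t[0], t[1]))
--     return [t[2] for t in reps[: max(0, limit)]]
-- ===== Notes on version B (the rewrite author's own statement) =====
-- stated objective: alternative
-- what changed: A keeps a running best-so-far item per key in one dict and then stable-sorts the dict values by timestamp; B instead groups all items per key, picks each group's first maximal-timestamp item with max(), and sorts the representatives by an explicit (-timestamp, first-appearance rank) key, making the tie-break order explicit instead of relying on dict insertion order.
import Mathlib
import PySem

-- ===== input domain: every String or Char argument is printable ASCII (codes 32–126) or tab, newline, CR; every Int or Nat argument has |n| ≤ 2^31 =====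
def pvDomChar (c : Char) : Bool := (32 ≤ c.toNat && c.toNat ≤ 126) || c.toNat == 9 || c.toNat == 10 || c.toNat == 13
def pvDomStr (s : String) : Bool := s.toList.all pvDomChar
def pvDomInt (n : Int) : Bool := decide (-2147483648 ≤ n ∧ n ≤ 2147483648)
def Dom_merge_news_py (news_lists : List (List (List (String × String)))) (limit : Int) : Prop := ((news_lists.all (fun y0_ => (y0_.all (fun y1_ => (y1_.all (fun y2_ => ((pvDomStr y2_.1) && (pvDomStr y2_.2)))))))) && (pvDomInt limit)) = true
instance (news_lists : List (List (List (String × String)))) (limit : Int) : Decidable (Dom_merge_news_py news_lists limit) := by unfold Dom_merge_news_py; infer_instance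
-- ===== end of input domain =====

-- B replaces A's running-best dict with a group-by-key / first-max-per-group / explicit
-- (-timestamp, first-appearance-rank) sort decomposition: an alternative of the same cost.

-- ===== PORT A =====
-- item.get("url") or item.get("headline"): None and "" are the falsy cases, both modelled by ""
def pvKeyA (item : List (String × String)) : String :=
  let u := PySem.Dict.getD (PySem.Dict.mk item) "url" ""
  if u = "" then PySem.Dict.getD (PySem.Dict.mk item) "headline" "" else u

-- int(item.get("published_ts", 0) or 0); Pre_ guarantees ofStr? succeeds, so the `.getD 0` is never used
def pvTsA (item : List (String × String)) : Int :=
  let s := PySem.Dict.getD (PySem.Dict.mk item) "published_ts" ""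
  if s = "" then 0 else (PySem.Int.ofStr? s).getD 0

def merge_news_py (news_lists : List (List (List (String × String)))) (limit : Int) : List (List (String × String)) :=
  let by_key : PySem.Dict String (List (String × String)) :=
    news_lists.foldl (fun bk items =>
      items.foldl (fun bk item =>
        let key := pvKeyA item
        if key = "" then bk
        else
          let prev := bk.get? key
          let prev_ts := pvTsA (prev.getD [])
          let curr_ts := pvTsA item
          if prev = none ∨ prev_ts < curr_ts then bk.insert key item else bk) bk)
      PySem.Dict.empty
  let merged := PySem.List.sorted by_key.values (fun x => pvTsA x) true
  PySem.List.slice merged none (some (max 0 limit))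

-- ===== PORT B =====
def pvKeyB (item : List (String × String)) : String :=
  let u := PySem.Dict.getD (PySem.Dict.mk item) "url" ""
  if u = "" then PySem.Dict.getD (PySem.Dict.mk item) "headline" "" else u

def pvTsB (item : List (String × String)) : Int :=
  let s := PySem.Dict.getD (PySem.Dict.mk item) "published_ts" ""
  if s = "" then 0 else (PySem.Int.ofStr? s).getD 0

def merge_news_py_alt (news_lists : List (List (List (String × String)))) (limit : Int) : List (List (String × String)) :=
  let st : List String × PySem.Dict String (List (Int × List (String × String))) :=
    news_lists.foldl (fun st items =>
      items.foldl (fun st item =>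
        let key := pvKeyB item
        if key = "" then st
        else
          let st2 := if st.2.contains key then st else (st.1 ++ [key], st.2.insert key [])
          (st2.1, st2.2.modify key [] (fun l => l ++ [(pvTsB item, item)]))) st)
      ([], PySem.Dict.empty)
  let reps : List (Int × Int × List (String × String)) :=
    (PySem.List.enumerate st.1 0).foldl (fun acc p =>
      match PySem.List.max? (st.2.getD p.2 []) (fun q => q.1) with
      | some m => acc ++ [(-m.1, p.1, m.2)]
      | none => acc) []   -- `none` is unreachable: every key in `order` has a nonempty group
  let srt := PySem.List.sorted2 reps (fun t => t.1) (fun t => t.2.1) false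
  (PySem.List.slice srt none (some (max 0 limit))).map (fun t => t.2.2)

-- ===== PRECONDITION & SPEC =====
-- Pre_ excludes exactly the inputs where Python raises ValueError: some item with a nonempty
-- key has a nonempty "published_ts" string that is not a valid int literal (both A and B raise there).
def Pre_merge_news_py (news_lists : List (List (List (String × String)))) (limit : Int) : Prop :=
  ∀ item ∈ news_lists.flatten, pvKeyA item ≠ "" →
    (PySem.Dict.getD (PySem.Dict.mk item) "published_ts" "" = "" ∨
     (PySem.Int.ofStr? (PySem.Dict.getD (PySem.Dict.mk item) "published_ts" "")).isSome = true)
instance (news_lists : List (List (List (String × String)))) (limit : Int) : Decidable (Pre_merge_news_py news_lists limit) := by unfold Pre_merge_news_py; infer_instance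

def pvWitness_merge_news_py : (List (List (List (String × String)))) × Int :=
  ([[[("url", "u1"), ("published_ts", "3")], [("headline", "h"), ("published_ts", "5")]],
    [[("url", "u1"), ("published_ts", "9")]]], 2)

def Spec_merge_news_py (news_lists : List (List (List (String × String)))) (limit : Int) (out : List (List (String × String))) : Prop := out = merge_news_py_alt news_lists limit
instance (news_lists : List (List (List (String × String)))) (limit : Int) (out : List (List (String × String))) : Decidable (Spec_merge_news_py news_lists limit out) := by unfold Spec_merge_news_py; infer_instance

-- ===== CLAIM (what is proved, stated in full; the proofs are below) =====
def Claim_equal_merge_news_py : Prop := ∀ (news_lists : List (List (List (String × String)))) (limit : Int), Dom_merge_news_py news_lists limit → Pre_merge_news_py news_lists limit → Spec_merge_news_py news_lists limit (merge_news_py news_lists limit)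

-- ===== LEMMAS AND PROOFS =====

abbrev PvItem : Type := List (String × String)

-- the items that survive the `if not key: continue` guard, in stream order
def pvFlt (news_lists : List (List PvItem)) : List PvItem :=
  news_lists.flatten.filter (fun it => decide (pvKeyA it ≠ ""))

def pvKeysOf (pre : List PvItem) : List String := PySem.Set.ofList (pre.map pvKeyA)

def pvGrpOf (pre : List PvItem) (k : String) : List (Int × PvItem) :=
  (pre.filter (fun it => decide (pvKeyA it = k))).map (fun it => (pvTsA it, it))

def pvBestOf? (pre : List PvItem) (k : String) : Option (Int × PvItem) :=
  PySem.List.max? (pvGrpOf pre k) (fun q => q.1)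

def pvBestItem (pre : List PvItem) (k : String) : PvItem :=
  match pvBestOf? pre k with
  | some m => m.2
  | none => []

def pvBestTs (pre : List PvItem) (k : String) : Int :=
  match pvBestOf? pre k with
  | some m => m.1
  | none => 0

def pvStepA (bk : PySem.Dict String PvItem) (item : PvItem) : PySem.Dict String PvItem :=
  let key := pvKeyA item
  let prev := bk.get? key
  if prev = none ∨ pvTsA (prev.getD []) < pvTsA item then bk.insert key item else bk

def pvDictA (pre : List PvItem) : PySem.Dict String PvItem := pre.foldl pvStepA PySem.Dict.empty

def pvStepB (st : List String × PySem.Dict String (List (Int × PvItem))) (item : PvItem) :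
    List String × PySem.Dict String (List (Int × PvItem)) :=
  let key := pvKeyA item
  let st2 := if st.2.contains key then st else (st.1 ++ [key], st.2.insert key [])
  (st2.1, st2.2.modify key [] (fun l => l ++ [(pvTsA item, item)]))

def pvStB (pre : List PvItem) : List String × PySem.Dict String (List (Int × PvItem)) :=
  pre.foldl pvStepB ([], PySem.Dict.empty)

-- ranking relation used as the stability tie-break: first-appearance order of the key
def pvM (pre : List PvItem) (a b : PvItem) : Prop :=
  pvTsA b < pvTsA a ∨ (pvTsA a = pvTsA b ∧ (pvKeysOf pre).idxOf (pvKeyA a) < (pvKeysOf pre).idxOf (pvKeyA b))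

-- ---- A side: collapse to a fold over pvFlt ----
lemma mergeA_eq (news_lists : List (List PvItem)) (limit : Int) :
    merge_news_py news_lists limit =
      PySem.List.slice
        (PySem.List.sorted (pvDictA (pvFlt news_lists)).values (fun x => pvTsA x) true)
        none (some (max 0 limit)) := by
  simp only [merge_news_py, pvDictA, pvFlt]
  rw [List.foldl_filter, ← List.foldl_flatten]
  have hf : (List.foldl
        (fun (bk : PySem.Dict String PvItem) item =>
          if pvKeyA item = "" then bk
          else
            if bk.get? (pvKeyA item) = none ∨ pvTsA ((bk.get? (pvKeyA item)).getD []) < pvTsA item then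
              bk.insert (pvKeyA item) item
            else bk)
        PySem.Dict.empty news_lists.flatten) =
      List.foldl (fun x y => if decide (pvKeyA y ≠ "") = true then pvStepA x y else x)
        PySem.Dict.empty news_lists.flatten := by
    apply PySem.List.foldl_congr_mem
    intro acc x _
    by_cases h : pvKeyA x = "" <;> simp [h, pvStepA]
  rw [hf]

-- ---- basic facts ----
lemma keysOf_append_singleton (pre : List PvItem) (it : PvItem) :
    pvKeysOf (pre ++ [it]) = PySem.Set.add (pvKeysOf pre) (pvKeyA it) := by
  simp [pvKeysOf, PySem.Set.ofList, List.foldl_append]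

lemma grpOf_append_singleton (pre : List PvItem) (it : PvItem) (k : String) :
    pvGrpOf (pre ++ [it]) k =
      pvGrpOf pre k ++ (if pvKeyA it = k then [(pvTsA it, it)] else []) := by
  by_cases h : pvKeyA it = k <;> simp [pvGrpOf, List.filter_append, h]

lemma max?_append_singleton {α : Type} (key : α → Int) (l : List α) (x : α) :
    PySem.List.max? (l ++ [x]) key =
      some (match PySem.List.max? l key with
            | none => x
            | some m => if key m < key x then x else m) := by
  have h1 : PySem.List.max? (l ++ [x]) key =
      match PySem.List.max? l key with
      | none => some x
      | some m => if key m < key x then some x else some m := by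
    simp only [PySem.List.max?, List.foldl_append, List.foldl]
    rfl
  rw [h1]
  cases PySem.List.max? l key
  · rfl
  · dsimp only
    split <;> rfl

lemma grpOf_mem (pre : List PvItem) (k : String) (q : Int × PvItem) (h : q ∈ pvGrpOf pre k) :
    q.1 = pvTsA q.2 ∧ pvKeyA q.2 = k ∧ q.2 ∈ pre := by
  simp only [pvGrpOf, List.mem_map, List.mem_filter, decide_eq_true_eq] at h
  obtain ⟨it, ⟨hmem, hkey⟩, rfl⟩ := h
  exact ⟨rfl, hkey, hmem⟩

lemma grpOf_nil_of_not_mem (pre : List PvItem) (k : String) (h : k ∉ pvKeysOf pre) :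
    pvGrpOf pre k = [] := by
  simp only [pvKeysOf, PySem.Set.mem_ofList, List.mem_map] at h
  push_neg at h
  simp only [pvGrpOf, List.map_eq_nil_iff, List.filter_eq_nil_iff, decide_eq_true_eq]
  intro it hmem
  exact fun hk => (h it hmem) hk

lemma dict_contains_iff {ν : Type} (d : PySem.Dict String ν) (k : String) :
    d.contains k = true ↔ (d.get? k).isSome = true := by
  simp [PySem.Dict.contains_eq_isSome_get?]

lemma dict_keys_insert {ν : Type} (d : PySem.Dict String ν) (k : String) (v : ν) :
    (d.insert k v).items.map Prod.fst =
      if d.contains k then d.items.map Prod.fst else d.items.map Prod.fst ++ [k] := by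
  by_cases h : d.contains k = true
  · simp only [PySem.Dict.insert, h, if_true, List.map_map]
    apply List.map_congr_left
    intro p _
    by_cases hp : p.1 = k
    · simp [hp]
    · simp [hp]
  · simp [PySem.Dict.insert, h]

lemma dict_contains_mem {ν : Type} (d : PySem.Dict String ν) (k : String) :
    d.contains k = true ↔ k ∈ d.items.map Prod.fst := by
  constructor
  · intro h
    simp only [PySem.Dict.contains, List.any_eq_true] at h
    obtain ⟨p, hp, hbeq⟩ := h
    exact List.mem_map.2 ⟨p, hp, eq_of_beq hbeq⟩
  · intro h
    obtain ⟨p, hp, hfk⟩ := List.mem_map.1 h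
    simp only [PySem.Dict.contains, List.any_eq_true]
    exact ⟨p, hp, by simp [hfk]⟩

lemma best?_append (pre : List PvItem) (it : PvItem) (k : String) :
    pvBestOf? (pre ++ [it]) k =
      if pvKeyA it = k then
        some (match pvBestOf? pre k with
              | none => (pvTsA it, it)
              | some m => if m.1 < pvTsA it then (pvTsA it, it) else m)
      else pvBestOf? pre k := by
  by_cases hkk : pvKeyA it = k
  · rw [if_pos hkk, pvBestOf?, grpOf_append_singleton, if_pos hkk, max?_append_singleton]
    simp only [pvBestOf?]
    cases PySem.List.max? (pvGrpOf pre k) fun q => q.1 <;> rfl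
  · rw [if_neg hkk, pvBestOf?, grpOf_append_singleton, if_neg hkk, List.append_nil, pvBestOf?]

lemma stepA_char (pre : List PvItem) (it : PvItem) (d : PySem.Dict String PvItem)
    (h1 : d.items.map Prod.fst = pvKeysOf pre)
    (h2 : ∀ k, d.get? k = (pvBestOf? pre k).map (fun m => m.2)) :
    (pvStepA d it).items.map Prod.fst = pvKeysOf (pre ++ [it]) ∧
    (∀ k, (pvStepA d it).get? k = (pvBestOf? (pre ++ [it]) k).map (fun m => m.2)) := by
  cases hprev : d.get? (pvKeyA it) with
  | none =>
    have hb : pvBestOf? pre (pvKeyA it) = none := by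
      have h := h2 (pvKeyA it)
      rw [hprev] at h
      cases hbb : pvBestOf? pre (pvKeyA it)
      · rfl
      · rw [hbb] at h; simp at h
    have hcontains : d.contains (pvKeyA it) = false := by
      have := dict_contains_iff d (pvKeyA it)
      rw [hprev] at this; simp at this; exact this
    have hmem : pvKeyA it ∉ pvKeysOf pre := by
      rw [← h1]; intro hm
      rw [← dict_contains_mem] at hm
      rw [hm] at hcontains; cases hcontains
    have hstep : pvStepA d it = d.insert (pvKeyA it) it := by
      simp [pvStepA, hprev]
    constructor
    · rw [hstep, dict_keys_insert, hcontains, if_neg (by simp), h1, keysOf_append_singleton]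
      simp [PySem.Set.add, hmem]
    · intro k
      by_cases hkk : k = pvKeyA it
      · subst hkk
        rw [hstep, PySem.Dict.get?_insert_self, best?_append, if_pos rfl, hb]
        rfl
      · rw [hstep, PySem.Dict.get?_insert_of_ne _ _ hkk, best?_append,
          if_neg (fun h => hkk h.symm), h2]
  | some p =>
    have hb : ∃ m, pvBestOf? pre (pvKeyA it) = some m ∧ m.2 = p := by
      have h := h2 (pvKeyA it)
      rw [hprev] at h
      cases hbb : pvBestOf? pre (pvKeyA it)
      · rw [hbb] at h; simp at h
      · rw [hbb] at h
        simp at h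
        exact ⟨_, rfl, h.symm⟩
    obtain ⟨m, hbm, hm2⟩ := hb
    have hmmem : m ∈ pvGrpOf pre (pvKeyA it) := PySem.List.max?_mem hbm
    have hts : m.1 = pvTsA m.2 := (grpOf_mem _ _ _ hmmem).1
    have hcontains : d.contains (pvKeyA it) = true := by
      rw [dict_contains_iff, hprev]; rfl
    have hmem : pvKeyA it ∈ pvKeysOf pre := by
      rw [← h1, ← dict_contains_mem]; exact hcontains
    have hkeys : pvKeysOf (pre ++ [it]) = pvKeysOf pre := by
      rw [keysOf_append_singleton]
      simp [PySem.Set.add, hmem]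
    by_cases hlt : pvTsA p < pvTsA it
    · have hstep : pvStepA d it = d.insert (pvKeyA it) it := by
        simp [pvStepA, hprev, hlt]
      constructor
      · rw [hstep, dict_keys_insert, hcontains, if_pos rfl, h1, hkeys]
      · intro k
        by_cases hkk : k = pvKeyA it
        · subst hkk
          rw [hstep, PySem.Dict.get?_insert_self, best?_append, if_pos rfl, hbm]
          have : m.1 < pvTsA it := by rw [hts, hm2]; exact hlt
          simp [this]
        · rw [hstep, PySem.Dict.get?_insert_of_ne _ _ hkk, best?_append,
            if_neg (fun h => hkk h.symm), h2]
    · have hstep : pvStepA d it = d := by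
        simp [pvStepA, hprev, hlt]
      constructor
      · rw [hstep, h1, hkeys]
      · intro k
        by_cases hkk : k = pvKeyA it
        · subst hkk
          rw [hstep, best?_append, if_pos rfl, hbm, hprev]
          have : ¬ m.1 < pvTsA it := by rw [hts, hm2]; exact hlt
          simp [this, hm2]
        · rw [hstep, best?_append, if_neg (fun h => hkk h.symm), h2]

-- ---- A side: dictionary characterization ----
lemma dictA_char_aux (rest : List PvItem) :
    ∀ (pre : List PvItem) (d : PySem.Dict String PvItem),
      (∀ it ∈ rest, pvKeyA it ≠ "") →
      d.items.map Prod.fst = pvKeysOf pre →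
      (∀ k, d.get? k = (pvBestOf? pre k).map (fun m => m.2)) →
      (rest.foldl pvStepA d).items.map Prod.fst = pvKeysOf (pre ++ rest) ∧
      (∀ k, (rest.foldl pvStepA d).get? k = (pvBestOf? (pre ++ rest) k).map (fun m => m.2)) := by
  induction rest with
  | nil =>
    intro pre d _ h1 h2
    simpa using ⟨h1, h2⟩
  | cons it rest ih =>
    intro pre d hk h1 h2
    have hstep := stepA_char pre it d h1 h2
    have := ih (pre ++ [it]) (pvStepA d it) (fun x hx => hk x (by simp [hx])) hstep.1 hstep.2
    simpa [List.append_assoc] using this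

lemma dictA_char (pre : List PvItem) (h : ∀ it ∈ pre, pvKeyA it ≠ "") :
    (pvDictA pre).items.map Prod.fst = pvKeysOf pre ∧
    (∀ k, (pvDictA pre).get? k = (pvBestOf? pre k).map (fun m => m.2)) := by
  have := dictA_char_aux pre [] PySem.Dict.empty h (by simp [pvKeysOf, PySem.Set.ofList]; rfl)
    (by intro k; simp [PySem.Dict.get?, PySem.Dict.empty, pvBestOf?, pvGrpOf, PySem.List.max?])
  simpa using this

lemma assoc_items_eq {ν : Type} (l : List (String × ν)) (f : String → ν)
    (hnd : (l.map Prod.fst).Nodup)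
    (h : ∀ k ∈ l.map Prod.fst, (PySem.Dict.mk l).get? k = some (f k)) :
    l = (l.map Prod.fst).map (fun k => (k, f k)) := by
  induction l with
  | nil => rfl
  | cons p t ih =>
    have hhead : (PySem.Dict.mk (p :: t)).get? p.1 = some p.2 := by
      rw [PySem.Dict.get?_mk_cons]
      simp
    have hp2 : p.2 = f p.1 := by
      have := h p.1 (by simp)
      rw [hhead] at this
      exact Option.some.inj this
    have hnd' : (t.map Prod.fst).Nodup := (List.nodup_cons.1 (by simpa using hnd)).2
    have hnotin : p.1 ∉ t.map Prod.fst := (List.nodup_cons.1 (by simpa using hnd)).1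
    have ht : t = (t.map Prod.fst).map (fun k => (k, f k)) := by
      apply ih hnd'
      intro k hk
      have hne : p.1 ≠ k := fun he => hnotin (he ▸ hk)
      have := h k (by simp [hk])
      rwa [PySem.Dict.get?_mk_cons, if_neg (by simpa using hne)] at this
    calc p :: t = (p.1, p.2) :: t := by rw [Prod.mk.eta]
      _ = ((p :: t).map Prod.fst).map (fun k => (k, f k)) := by
          rw [hp2]
          simp only [List.map_cons]
          rw [← ht]

lemma best?_isSome (pre : List PvItem) (k : String) (hk : k ∈ pvKeysOf pre) :
    pvBestOf? pre k = some (pvBestTs pre k, pvBestItem pre k) := by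
  have hne : pvGrpOf pre k ≠ [] := by
    simp only [pvKeysOf, PySem.Set.mem_ofList, List.mem_map] at hk
    obtain ⟨it, hmem, hkey⟩ := hk
    simp only [pvGrpOf, ne_eq, List.map_eq_nil_iff, List.filter_eq_nil_iff]
    push_neg
    exact ⟨it, hmem, by simp [hkey]⟩
  cases hbb : pvBestOf? pre k with
  | none =>
    simp only [pvBestOf?] at hbb
    exact absurd ((PySem.List.max?_eq_none_iff _ _).1 hbb) hne
  | some m => simp [pvBestTs, pvBestItem, hbb]

lemma valuesA_eq (pre : List PvItem) (h : ∀ it ∈ pre, pvKeyA it ≠ "") :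
    (pvDictA pre).values = (pvKeysOf pre).map (fun k => pvBestItem pre k) := by
  obtain ⟨h1, h2⟩ := dictA_char pre h
  have hnd : ((pvDictA pre).items.map Prod.fst).Nodup := by
    rw [h1]; exact PySem.Set.nodup_ofList _
  have hget : ∀ k ∈ (pvDictA pre).items.map Prod.fst,
      (PySem.Dict.mk (pvDictA pre).items).get? k = some (pvBestItem pre k) := by
    intro k hk
    have : (PySem.Dict.mk (pvDictA pre).items) = pvDictA pre := rfl
    rw [this, h2 k, best?_isSome pre k (h1 ▸ hk)]
    rfl
  have hitems := assoc_items_eq (pvDictA pre).items (fun k => pvBestItem pre k) hnd hget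
  show (pvDictA pre).items.map (fun x => x.2) = _
  rw [hitems, List.map_map, h1]
  rfl

-- ---- generic insertion-sort pairwise machinery ----
lemma insertBy_pairwise {α : Type} (before : α → α → Bool) (L S : α → α → Prop)
    (hb : ∀ x y, before x y = true → L x y)
    (hn : ∀ x y, before x y = false → S y x → L y x)
    (ht : ∀ x y z, L x y → L y z → L x z) :
    ∀ (acc : List α) (x : α), acc.Pairwise L → (∀ y ∈ acc, S y x) →
      (PySem.List.insertBy before x acc).Pairwise L := by
  intro acc
  induction acc with
  | nil => intro x _ _; simp [PySem.List.insertBy]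
  | cons y ys ih =>
    intro x hp hs
    rw [List.pairwise_cons] at hp
    obtain ⟨hy, hys⟩ := hp
    by_cases hbxy : before x y = true
    · rw [show PySem.List.insertBy before x (y :: ys) = x :: y :: ys from by
        simp [PySem.List.insertBy, hbxy]]
      refine List.Pairwise.cons ?_ (List.Pairwise.cons hy hys)
      intro z hz
      rcases List.mem_cons.1 hz with rfl | hzys
      · exact hb _ _ hbxy
      · exact ht _ _ _ (hb _ _ hbxy) (hy z hzys)
    · rw [show PySem.List.insertBy before x (y :: ys) = y :: PySem.List.insertBy before x ys from by
        simp [PySem.List.insertBy, hbxy]]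
      refine List.Pairwise.cons ?_ (ih x hys (fun z hz => hs z (List.mem_cons_of_mem _ hz)))
      intro z hz
      rcases (PySem.List.mem_insertBy before x z ys).1 hz with rfl | hzys
      · exact hn _ _ (by simpa using hbxy) (hs y (by simp))
      · exact hy z hzys

lemma foldl_insertBy_pairwise {α : Type} (before : α → α → Bool) (L S : α → α → Prop)
    (hb : ∀ x y, before x y = true → L x y)
    (hn : ∀ x y, before x y = false → S y x → L y x)
    (ht : ∀ x y z, L x y → L y z → L x z) :
    ∀ (xs acc : List α), acc.Pairwise L → (∀ y ∈ acc, ∀ x ∈ xs, S y x) → xs.Pairwise S →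
      (xs.foldl (fun a x => PySem.List.insertBy before x a) acc).Pairwise L := by
  intro xs
  induction xs with
  | nil => intro acc h _ _; simpa using h
  | cons x rest ih =>
    intro acc hacc hS hxs
    rw [List.pairwise_cons] at hxs
    obtain ⟨hx, hrest⟩ := hxs
    simp only [List.foldl_cons]
    apply ih
    · exact insertBy_pairwise before L S hb hn ht acc x hacc (fun y hy => hS y hy x (by simp))
    · intro y hy x' hx'
      rcases (PySem.List.mem_insertBy before x y acc).1 hy with rfl | hyacc
      · exact hx x' hx'
      · exact hS y hyacc x' (by simp [hx'])
    · exact hrest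

lemma sorted_rev_stable {α : Type} (key : α → Int) (r : α → α → Prop)
    (htr : ∀ a b c, r a b → r b c → r a c) (xs : List α) (h : xs.Pairwise r) :
    (PySem.List.sorted xs key true).Pairwise
      (fun a b => key b < key a ∨ (key a = key b ∧ r a b)) := by
  have hs : PySem.List.sorted xs key true =
      xs.foldl (fun a x => PySem.List.insertBy (fun a b => decide (key b < key a)) x a) [] := by
    simp [PySem.List.sorted]
  rw [hs]
  apply foldl_insertBy_pairwise (S := r)
  · intro x y hxy
    left
    simpa using hxy
  · intro x y hxy hS
    have : ¬ key y < key x := by simpa using hxy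
    rcases lt_or_eq_of_le (not_lt.1 this) with hlt | heq
    · exact Or.inl hlt
    · exact Or.inr ⟨heq.symm, hS⟩
  · intro x y z hxy hyz
    rcases hxy with h1 | ⟨h1, h1'⟩ <;> rcases hyz with h2 | ⟨h2, h2'⟩
    · exact Or.inl (lt_trans h2 h1)
    · exact Or.inl (h2 ▸ h1)
    · exact Or.inl (h1 ▸ h2)
    · exact Or.inr ⟨h1.trans h2, htr _ _ _ h1' h2'⟩
  · exact List.Pairwise.nil
  · intro y hy; cases hy
  · exact h

lemma sorted2_strict {α : Type} (k1 k2 : α → Int) (xs : List α)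
    (h : xs.Pairwise (fun a b => k2 a ≠ k2 b)) :
    (PySem.List.sorted2 xs k1 k2 false).Pairwise
      (fun a b => k1 a < k1 b ∨ (k1 a = k1 b ∧ k2 a < k2 b)) := by
  have hs : PySem.List.sorted2 xs k1 k2 false =
      xs.foldl (fun a x => PySem.List.insertBy
        (fun a b => decide (k1 a < k1 b) || (!decide (k1 b < k1 a) && decide (k2 a < k2 b))) x a) [] := by
    simp [PySem.List.sorted2]
  rw [hs]
  apply foldl_insertBy_pairwise (S := fun a b => k2 a ≠ k2 b)
  · intro x y hxy
    simp only [Bool.or_eq_true, Bool.and_eq_true, Bool.not_eq_true', decide_eq_true_eq,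
      decide_eq_false_iff_not] at hxy
    rcases hxy with h1 | ⟨h1, h2⟩
    · exact Or.inl h1
    · rcases lt_or_eq_of_le (not_lt.1 h1) with hlt | heq
      · exact Or.inl hlt
      · exact Or.inr ⟨heq, h2⟩
  · intro x y hxy hS
    have h1 : ¬ k1 x < k1 y := by
      intro hc
      simp [hc] at hxy
    by_cases h2 : k1 y < k1 x
    · exact Or.inl h2
    · have heq : k1 y = k1 x := le_antisymm (not_lt.1 h1) (not_lt.1 h2)
      have h3 : ¬ k2 x < k2 y := by
        intro hc
        simp [hc, h2] at hxy
      rcases lt_or_eq_of_le (not_lt.1 h3) with hlt2 | heq2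
      · exact Or.inr ⟨heq, hlt2⟩
      · exact absurd heq2 hS
  · intro x y z hxy hyz
    rcases hxy with h1 | ⟨h1, h1'⟩ <;> rcases hyz with h2 | ⟨h2, h2'⟩
    · exact Or.inl (lt_trans h1 h2)
    · exact Or.inl (h2 ▸ h1)
    · exact Or.inl (h1 ▸ h2)
    · exact Or.inr ⟨h1.trans h2, lt_trans h1' h2'⟩
  · exact List.Pairwise.nil
  · intro y hy; cases hy
  · exact h

-- ---- rank facts ----
lemma nodup_pairwise_idxOf (l : List String) (h : l.Nodup) :
    l.Pairwise (fun a b => l.idxOf a < l.idxOf b) := by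
  rw [List.pairwise_iff_getElem]
  intro i j hi hj hij
  rw [List.Nodup.idxOf_getElem h i hi, List.Nodup.idxOf_getElem h j hj]
  exact hij

lemma bestItem_key (pre : List PvItem) (k : String) (hk : k ∈ pvKeysOf pre) :
    pvKeyA (pvBestItem pre k) = k ∧ pvTsA (pvBestItem pre k) = pvBestTs pre k := by
  have hb := best?_isSome pre k hk
  have hmem : (pvBestTs pre k, pvBestItem pre k) ∈ pvGrpOf pre k := PySem.List.max?_mem hb
  have hq := grpOf_mem pre k _ hmem
  exact ⟨hq.2.1, hq.1.symm⟩

lemma mergedA_pairwise (news_lists : List (List PvItem)) :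
    (PySem.List.sorted (pvDictA (pvFlt news_lists)).values (fun x => pvTsA x) true).Pairwise
      (pvM (pvFlt news_lists)) := by
  have hflt : ∀ it ∈ pvFlt news_lists, pvKeyA it ≠ "" := by
    intro it hit
    simpa using (List.mem_filter.1 hit).2
  rw [valuesA_eq (pvFlt news_lists) hflt]
  have hnd := PySem.Set.nodup_ofList ((pvFlt news_lists).map pvKeyA)
  have hkp : (pvKeysOf (pvFlt news_lists)).Pairwise
      (fun a b => (pvKeysOf (pvFlt news_lists)).idxOf a < (pvKeysOf (pvFlt news_lists)).idxOf b) :=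
    nodup_pairwise_idxOf _ hnd
  apply sorted_rev_stable (key := fun x => pvTsA x)
    (r := fun a b => (pvKeysOf (pvFlt news_lists)).idxOf (pvKeyA a) <
      (pvKeysOf (pvFlt news_lists)).idxOf (pvKeyA b))
  · intro a b c h1 h2
    exact lt_trans h1 h2
  · rw [List.pairwise_map]
    refine List.Pairwise.imp_of_mem ?_ hkp
    intro a b ha hb hab
    rwa [(bestItem_key _ _ ha).1, (bestItem_key _ _ hb).1]

lemma stepB_char (pre : List PvItem) (it : PvItem)
    (st : List String × PySem.Dict String (List (Int × PvItem)))
    (h1 : st.1 = pvKeysOf pre)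
    (h2 : ∀ k, st.2.get? k = if k ∈ pvKeysOf pre then some (pvGrpOf pre k) else none) :
    (pvStepB st it).1 = pvKeysOf (pre ++ [it]) ∧
    (∀ k, (pvStepB st it).2.get? k =
      if k ∈ pvKeysOf (pre ++ [it]) then some (pvGrpOf (pre ++ [it]) k) else none) := by
  by_cases hmem : pvKeyA it ∈ pvKeysOf pre
  · have hcon : st.2.contains (pvKeyA it) = true := by
      rw [dict_contains_iff, h2, if_pos hmem]; rfl
    have hstep : pvStepB st it =
        (st.1, st.2.insert (pvKeyA it) ((st.2.getD (pvKeyA it) []) ++ [(pvTsA it, it)])) := by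
      simp [pvStepB, hcon, PySem.Dict.modify]
    have hkeys : pvKeysOf (pre ++ [it]) = pvKeysOf pre := by
      rw [keysOf_append_singleton]; simp [PySem.Set.add, hmem]
    refine ⟨by rw [hstep, hkeys]; exact h1, ?_⟩
    intro k
    by_cases hkk : k = pvKeyA it
    · subst hkk
      rw [hstep]
      show (st.2.insert (pvKeyA it) _).get? (pvKeyA it) = _
      rw [PySem.Dict.get?_insert_self, hkeys, if_pos hmem, PySem.Dict.getD, h2, if_pos hmem,
        grpOf_append_singleton, if_pos rfl]
      rfl
    · rw [hstep]
      show (st.2.insert (pvKeyA it) _).get? k = _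
      rw [PySem.Dict.get?_insert_of_ne _ _ hkk, h2, hkeys]
      have hgrp_eq : pvGrpOf (pre ++ [it]) k = pvGrpOf pre k := by
        rw [grpOf_append_singleton, if_neg (fun hh => hkk hh.symm), List.append_nil]
      rw [hgrp_eq]
  · have hget : st.2.get? (pvKeyA it) = none := by rw [h2, if_neg hmem]
    have hcon : st.2.contains (pvKeyA it) = false := by
      rw [PySem.Dict.contains_eq_isSome_get?, hget]; rfl
    have hstep : pvStepB st it =
        (st.1 ++ [pvKeyA it],
         (st.2.insert (pvKeyA it) []).insert (pvKeyA it)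
           (((st.2.insert (pvKeyA it) []).getD (pvKeyA it) []) ++ [(pvTsA it, it)])) := by
      simp [pvStepB, hcon, PySem.Dict.modify]
    have hkeys : pvKeysOf (pre ++ [it]) = pvKeysOf pre ++ [pvKeyA it] := by
      rw [keysOf_append_singleton]; simp [PySem.Set.add, hmem]
    have hgrpnil : pvGrpOf pre (pvKeyA it) = [] := grpOf_nil_of_not_mem pre _ hmem
    refine ⟨by rw [hstep, hkeys, h1], ?_⟩
    intro k
    by_cases hkk : k = pvKeyA it
    · subst hkk
      rw [hstep]
      show ((st.2.insert (pvKeyA it) []).insert (pvKeyA it) _).get? (pvKeyA it) = _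
      rw [PySem.Dict.get?_insert_self, hkeys, if_pos (by simp), PySem.Dict.getD,
        PySem.Dict.get?_insert_self, grpOf_append_singleton, if_pos rfl, hgrpnil]
      rfl
    · rw [hstep]
      show ((st.2.insert (pvKeyA it) []).insert (pvKeyA it) _).get? k = _
      rw [PySem.Dict.get?_insert_of_ne _ _ hkk, PySem.Dict.get?_insert_of_ne _ _ hkk, h2, hkeys]
      have hgrp_eq : pvGrpOf (pre ++ [it]) k = pvGrpOf pre k := by
        rw [grpOf_append_singleton, if_neg (fun hh => hkk hh.symm), List.append_nil]
      rw [hgrp_eq]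
      have hmem_iff : (k ∈ pvKeysOf pre ++ [pvKeyA it]) ↔ (k ∈ pvKeysOf pre) := by
        simp [hkk]
      by_cases hk2 : k ∈ pvKeysOf pre
      · rw [if_pos hk2, if_pos (hmem_iff.2 hk2)]
      · rw [if_neg hk2, if_neg (fun hc => hk2 (hmem_iff.1 hc))]

-- ---- B side ----
lemma stB_eq (news_lists : List (List PvItem)) (limit : Int) :
    merge_news_py_alt news_lists limit =
      (PySem.List.slice
        (PySem.List.sorted2
          ((PySem.List.enumerate (pvStB (pvFlt news_lists)).1 0).foldl (fun acc p =>
            match PySem.List.max? ((pvStB (pvFlt news_lists)).2.getD p.2 []) (fun q => q.1) with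
            | some m => acc ++ [(-m.1, p.1, m.2)]
            | none => acc) [])
          (fun t => t.1) (fun t => t.2.1) false)
        none (some (max 0 limit))).map (fun t => t.2.2) := by
  have hKB : pvKeyB = pvKeyA := rfl
  have hTB : pvTsB = pvTsA := rfl
  simp only [merge_news_py_alt, hKB, hTB, pvStB, pvFlt]
  rw [List.foldl_filter, ← List.foldl_flatten]
  have hf : (List.foldl
        (fun (st : List String × PySem.Dict String (List (Int × PvItem))) item =>
          if pvKeyA item = "" then st
          else
            ((if st.2.contains (pvKeyA item) then st
              else (st.1 ++ [pvKeyA item], st.2.insert (pvKeyA item) [])).1,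
             (if st.2.contains (pvKeyA item) then st
              else (st.1 ++ [pvKeyA item], st.2.insert (pvKeyA item) [])).2.modify (pvKeyA item) []
               (fun l => l ++ [(pvTsA item, item)])))
        ([], PySem.Dict.empty) news_lists.flatten) =
      List.foldl (fun x y => if decide (pvKeyA y ≠ "") = true then pvStepB x y else x)
        ([], PySem.Dict.empty) news_lists.flatten := by
    apply PySem.List.foldl_congr_mem
    intro acc x _
    by_cases h : pvKeyA x = "" <;> simp [h, pvStepB]
  rw [hf]
  rfl

lemma stB_char_aux (rest : List PvItem) :
    ∀ (pre : List PvItem) (st : List String × PySem.Dict String (List (Int × PvItem))),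
      (∀ it ∈ rest, pvKeyA it ≠ "") →
      st.1 = pvKeysOf pre →
      (∀ k, st.2.get? k = if k ∈ pvKeysOf pre then some (pvGrpOf pre k) else none) →
      (rest.foldl pvStepB st).1 = pvKeysOf (pre ++ rest) ∧
      (∀ k, (rest.foldl pvStepB st).2.get? k =
        if k ∈ pvKeysOf (pre ++ rest) then some (pvGrpOf (pre ++ rest) k) else none) := by
  induction rest with
  | nil =>
    intro pre st _ h1 h2
    simpa using ⟨h1, h2⟩
  | cons it rest ih =>
    intro pre st hk h1 h2
    have hstep := stepB_char pre it st h1 h2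
    have := ih (pre ++ [it]) (pvStepB st it) (fun x hx => hk x (by simp [hx])) hstep.1 hstep.2
    simpa [List.append_assoc] using this

lemma stB_char (pre : List PvItem) (h : ∀ it ∈ pre, pvKeyA it ≠ "") :
    (pvStB pre).1 = pvKeysOf pre ∧
    (∀ k, (pvStB pre).2.get? k = if k ∈ pvKeysOf pre then some (pvGrpOf pre k) else none) := by
  have := stB_char_aux pre [] ([], PySem.Dict.empty) h (by simp [pvKeysOf, PySem.Set.ofList])
    (by intro k; simp [PySem.Dict.get?, PySem.Dict.empty, pvKeysOf, PySem.Set.ofList])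
  simpa using this

lemma enumerate_pairwise_fst {α : Type} (xs : List α) (s : Int) :
    (PySem.List.enumerate xs s).Pairwise (fun p q => p.1 < q.1) := by
  rw [PySem.List.enumerate_eq_zipIdx_map, List.pairwise_map, List.pairwise_iff_getElem]
  intro i j hi hj hij
  simp only [List.getElem_zipIdx]
  simp only [List.length_zipIdx] at hi hj
  omega

lemma enumerate_mem {α : Type} (xs : List α) (p : Int × α) (h : p ∈ PySem.List.enumerate xs 0) :
    ∃ n : Nat, ∃ hn : n < xs.length, p = ((n : Int), xs[n]) := by
  rw [PySem.List.enumerate_eq_zipIdx_map] at h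
  obtain ⟨⟨x, i⟩, hq, rfl⟩ := List.mem_map.1 h
  have hm := List.mem_zipIdx hq
  exact ⟨i, by omega, by simp [hm.2.2]⟩

lemma repsB_eq (pre : List PvItem) (h : ∀ it ∈ pre, pvKeyA it ≠ "") :
    ((PySem.List.enumerate (pvStB pre).1 0).foldl (fun acc p =>
        match PySem.List.max? ((pvStB pre).2.getD p.2 []) (fun q => q.1) with
        | some m => acc ++ [(-m.1, p.1, m.2)]
        | none => acc) []) =
      (PySem.List.enumerate (pvKeysOf pre) 0).map
        (fun p => (-(pvBestTs pre p.2), p.1, pvBestItem pre p.2)) := by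
  obtain ⟨hord, hget⟩ := stB_char pre h
  rw [hord]
  have hcongr : ∀ (acc : List (Int × Int × PvItem)), ∀ p ∈ PySem.List.enumerate (pvKeysOf pre) 0,
      (match PySem.List.max? ((pvStB pre).2.getD p.2 []) (fun q => q.1) with
        | some m => acc ++ [(-m.1, p.1, m.2)]
        | none => acc) = acc ++ [(-(pvBestTs pre p.2), p.1, pvBestItem pre p.2)] := by
    intro acc p hp
    obtain ⟨n, hn, rfl⟩ := enumerate_mem _ p hp
    have hmemk : (pvKeysOf pre)[n] ∈ pvKeysOf pre := by simp
    have hgd : (pvStB pre).2.getD (pvKeysOf pre)[n] [] = pvGrpOf pre (pvKeysOf pre)[n] := by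
      rw [PySem.Dict.getD, hget, if_pos hmemk]
      rfl
    rw [hgd]
    have hb := best?_isSome pre _ hmemk
    simp only [pvBestOf?] at hb
    rw [hb]
  rw [PySem.List.foldl_congr_mem _ _ _ _ hcongr]
  exact PySem.List.foldl_append_singleton_eq_map _ _ _

lemma pvM_antisymm (pre : List PvItem) (a b : PvItem) (h1 : pvM pre a b) (h2 : pvM pre b a) : a = b := by
  exfalso
  rcases h1 with ha | ⟨ha, ha2⟩ <;> rcases h2 with hb | ⟨hb, hb2⟩
  · exact lt_asymm ha hb
  · rw [hb] at ha; exact lt_irrefl _ ha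
  · rw [ha] at hb; exact lt_irrefl _ hb
  · exact lt_asymm ha2 hb2

-- the two pre-slice lists coincide: both are the first-max representatives,
-- strictly ordered by (-timestamp, first-appearance rank)
lemma main_eq (news_lists : List (List PvItem)) :
    (PySem.List.sorted2
        ((PySem.List.enumerate (pvKeysOf (pvFlt news_lists)) 0).map
          (fun p => (-(pvBestTs (pvFlt news_lists) p.2), p.1, pvBestItem (pvFlt news_lists) p.2)))
        (fun t => t.1) (fun t => t.2.1) false).map (fun t => t.2.2) =
      PySem.List.sorted (pvDictA (pvFlt news_lists)).values (fun x => pvTsA x) true := by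
  have hflt : ∀ it ∈ pvFlt news_lists, pvKeyA it ≠ "" := by
    intro it hit
    simpa using (List.mem_filter.1 hit).2
  have hnd : (pvKeysOf (pvFlt news_lists)).Nodup := PySem.Set.nodup_ofList _
  set F := pvFlt news_lists with hF
  set keys := pvKeysOf F with hkeysdef
  set reps := (PySem.List.enumerate keys 0).map
    (fun p => (-(pvBestTs F p.2), p.1, pvBestItem F p.2)) with hrepsdef
  set srt := PySem.List.sorted2 reps (fun t => t.1) (fun t => t.2.1) false with hsrtdef
  -- distinct secondary keys in reps
  have hrepsS : reps.Pairwise (fun a b => a.2.1 ≠ b.2.1) := by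
    rw [hrepsdef, List.pairwise_map]
    exact (enumerate_pairwise_fst keys 0).imp (fun h => ne_of_lt h)
  have hsrt : srt.Pairwise (fun a b => a.1 < b.1 ∨ (a.1 = b.1 ∧ a.2.1 < b.2.1)) :=
    sorted2_strict _ _ reps hrepsS
  -- canonical form of the members of srt
  have hmemform : ∀ t ∈ srt, ∃ k, k ∈ keys ∧
      t = (-(pvBestTs F k), ((keys.idxOf k : Nat) : Int), pvBestItem F k) := by
    intro t ht
    have htr : t ∈ reps := ((PySem.List.sorted2_perm reps _ _ false).mem_iff).1 ht
    rw [hrepsdef] at htr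
    obtain ⟨p, hp, rfl⟩ := List.mem_map.1 htr
    obtain ⟨n, hn, rfl⟩ := enumerate_mem _ p hp
    refine ⟨keys[n], by simp, ?_⟩
    rw [List.Nodup.idxOf_getElem hnd n hn]
  -- the projected list is Pairwise pvM
  have hmap : (srt.map (fun t => t.2.2)).Pairwise (pvM F) := by
    rw [List.pairwise_map]
    refine List.Pairwise.imp_of_mem ?_ hsrt
    intro a b ha hb hab
    obtain ⟨ka, hka, rfl⟩ := hmemform a ha
    obtain ⟨kb, hkb, rfl⟩ := hmemform b hb
    obtain ⟨hKa, hTa⟩ := bestItem_key F ka hka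
    obtain ⟨hKb, hTb⟩ := bestItem_key F kb hkb
    unfold pvM
    rw [hKa, hKb, hTa, hTb]
    rcases hab with h1 | ⟨h1, h2⟩
    · left
      simp only at h1
      omega
    · right
      simp only at h1 h2
      constructor
      · omega
      · exact_mod_cast h2
  -- both sides are permutations of the values list
  have hvals := valuesA_eq F hflt
  have hperm : (srt.map (fun t => t.2.2)).Perm
      (PySem.List.sorted (pvDictA F).values (fun x => pvTsA x) true) := by
    have p1 : srt.Perm reps := PySem.List.sorted2_perm reps _ _ false
    have p2 : reps.map (fun t => t.2.2) = keys.map (fun k => pvBestItem F k) := by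
      rw [hrepsdef, List.map_map, PySem.List.enumerate_eq_zipIdx_map, List.map_map]
      apply List.ext_getElem
      · simp
      · intro n h1 h2
        simp [List.getElem_zipIdx]
    have p3 : (srt.map (fun t => t.2.2)).Perm (keys.map (fun k => pvBestItem F k)) := by
      rw [← p2]
      exact p1.map _
    refine p3.trans ?_
    rw [← hvals]
    exact (PySem.List.sorted_perm (pvDictA F).values _ true).symm
  have hMA := mergedA_pairwise news_lists
  exact List.eq_of_perm_of_sorted
    (fun a b _ _ h1 h2 => pvM_antisymm F a b h1 h2) hmap hMA hperm

-- ===== VERDICT (by name: the statement is the Claim_ definition above) =====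
theorem merge_news_py_spec : Claim_equal_merge_news_py := by
  intro news_lists limit _ _
  unfold Spec_merge_news_py
  have hflt : ∀ it ∈ pvFlt news_lists, pvKeyA it ≠ "" := by
    intro it hit
    simpa using (List.mem_filter.1 hit).2
  rw [mergeA_eq, stB_eq, repsB_eq (pvFlt news_lists) hflt]
  have hnn : (0 : Int) ≤ max 0 limit := le_max_left 0 limit
  rw [PySem.List.slice_to _ hnn, PySem.List.slice_to _ hnn, List.map_take, main_eq news_lists]
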